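-- pv_equiv track=rewrite | github.com/Vancouver-wen/WandCalibration | extrinsicParameter/refinePose/multiViewTriangulate.py | get_cam_id_from_mask_and_step
-- ===== SOURCE A (Python) =====
-- def get_cam_id_from_mask_and_step(
--         mask,
--         step,
--     ):
--     sum=0
--     for i,each_mask in enumerate(mask):
--         if each_mask:
--             if step==sum:
--                 return i
--             sum+=1
-- ===== SOURCE B (Python) =====
-- def get_cam_id_from_mask_and_step(
--         mask,
--         step,
--     ):
--     if step < 0:
--         return None
--     pos = -1
--     for _ in range(step + 1):
--         try:
--             pos = mask.index(True, pos + 1)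
--         except ValueError:
--             return None
--     return pos
-- ===== Notes on version B (the rewrite author's own statement) =====
-- stated objective: alternative
-- what changed: Replaces A's single enumerate scan with a running True-counter by a loop over step itself: repeatedly jump to the next True via list.index(True, pos+1), step+1 times, and return the last position found.
import Mathlib
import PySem

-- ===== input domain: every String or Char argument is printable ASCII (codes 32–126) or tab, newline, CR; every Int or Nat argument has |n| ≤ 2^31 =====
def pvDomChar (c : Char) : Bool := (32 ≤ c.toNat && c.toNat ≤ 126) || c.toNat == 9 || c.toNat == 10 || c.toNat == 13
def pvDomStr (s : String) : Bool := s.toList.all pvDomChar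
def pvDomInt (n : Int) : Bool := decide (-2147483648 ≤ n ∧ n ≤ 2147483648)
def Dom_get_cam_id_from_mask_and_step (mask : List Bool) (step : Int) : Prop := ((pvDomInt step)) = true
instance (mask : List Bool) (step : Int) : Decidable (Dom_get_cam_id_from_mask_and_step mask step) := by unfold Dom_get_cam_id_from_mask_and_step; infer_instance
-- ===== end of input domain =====

-- B replaces A's counting scan by a recursion on step: find the next True with list.index,
-- recurse on the slice after it and shift the result; objective: alternative.

-- ===== PORT A =====
-- A's for-loop over enumerate(mask) with running counter `sum` and early return.
def pvGoA (step : Int) : List (Int × Bool) → Int → Option Int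
  | [], _ => none
  | (i, m) :: rest, sum =>
      if m then
        (if step = sum then some i else pvGoA step rest (sum + 1))
      else pvGoA step rest sum

def get_cam_id_from_mask_and_step (mask : List Bool) (step : Int) : Option Int :=
  pvGoA step (PySem.List.enumerate mask) 0

-- ===== PORT B =====
-- hand port of Python's mask.index(True, start): exact for start >= 0 (the only way B calls it)
def pvIndexFrom (mask : List Bool) (start : Int) : Option Int :=
  match PySem.List.index? (mask.drop start.toNat) true with
  | none => none
  | some q => some (start + q)

-- B's for-loop over range(step+1): pos := mask.index(True, pos+1), early return None on ValueError
def pvGoB (mask : List Bool) : Nat → Int → Option Int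
  | 0, pos => some pos
  | Nat.succ k, pos =>
      match pvIndexFrom mask (pos + 1) with
      | none => none
      | some p => pvGoB mask k p

def get_cam_id_from_mask_and_step_alt (mask : List Bool) (step : Int) : Option Int :=
  if step < 0 then none else pvGoB mask (step + 1).toNat (-1)

-- ===== PRECONDITION & SPEC =====
def Spec_get_cam_id_from_mask_and_step (mask : List Bool) (step : Int) (out : Option Int) : Prop := out = get_cam_id_from_mask_and_step_alt mask step
instance (mask : List Bool) (step : Int) (out : Option Int) : Decidable (Spec_get_cam_id_from_mask_and_step mask step out) := by unfold Spec_get_cam_id_from_mask_and_step; infer_instance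

-- ===== CLAIM (what is proved, stated in full; the proofs are below) =====
def Claim_equal_get_cam_id_from_mask_and_step : Prop := ∀ (mask : List Bool) (step : Int), Dom_get_cam_id_from_mask_and_step mask step → Spec_get_cam_id_from_mask_and_step mask step (get_cam_id_from_mask_and_step mask step)

-- ===== LEMMAS AND PROOFS =====

-- the list of indices of True entries, and selection with A's fall-through bounds
def pvIdx (mask : List Bool) : List Int :=
  ((PySem.List.enumerate mask).filter (fun p => p.2)).map (fun p => p.1)

def pvSel (l : List Int) (d : Int) : Option Int :=
  if 0 ≤ d ∧ d < (l.length : Int) then PySem.List.pyGet? l d else none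

lemma pvGoA_eq_select (step : Int) :
    ∀ (l : List (Int × Bool)) (c : Int),
      pvGoA step l c =
        (if 0 ≤ step - c ∧ step - c < (((l.filter (fun p => p.2)).map (fun p => p.1)).length : Int)
         then PySem.List.pyGet? ((l.filter (fun p => p.2)).map (fun p => p.1)) (step - c)
         else none) := by
  intro l
  induction l with
  | nil =>
      intro c
      rw [if_neg (by simp)]
      rfl
  | cons hd tl ih =>
      rcases hd with ⟨i, m⟩
      intro c
      cases m with
      | false => simpa using ih c
      | true =>
          have hf : (((((i, true) :: tl)).filter (fun p => p.2)).map (fun p => p.1))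
              = i :: ((tl.filter (fun p => p.2)).map (fun p => p.1)) := by simp
          rw [hf]
          set idx := (tl.filter (fun p => p.2)).map (fun p => p.1) with hidx
          simp only [pvGoA]
          rw [if_pos trivial]
          by_cases h : step = c
          · subst h
            rw [if_pos rfl, sub_self,
                if_pos ⟨le_refl 0, by exact_mod_cast Nat.succ_pos idx.length⟩,
                PySem.List.pyGet?_zero_cons]
          · rw [if_neg h, ih (c + 1)]
            by_cases hge : 0 ≤ step - (c + 1)
            · have ht : (step - c).toNat = (step - (c + 1)).toNat + 1 := by omega
              rw [PySem.List.pyGet?_of_nonneg _ hge,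
                  PySem.List.pyGet?_of_nonneg _ (by omega : (0:Int) ≤ step - c), ht,
                  List.getElem?_cons_succ]
              by_cases h2 : 0 ≤ step - (c + 1) ∧ step - (c + 1) < (idx.length : Int)
              · rw [if_pos h2, if_pos (by simp; omega)]
              · rw [if_neg h2, if_neg (by simp; omega)]
            · rw [if_neg (by omega), if_neg (by simp; omega)]

lemma goA_eq_sel (mask : List Bool) (step : Int) :
    get_cam_id_from_mask_and_step mask step = pvSel (pvIdx mask) step := by
  unfold get_cam_id_from_mask_and_step pvSel pvIdx
  rw [pvGoA_eq_select]
  simp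

-- index shift: enumerating from s just adds s to every kept index
lemma pvIdxAux_shift (xs : List Bool) :
    ∀ (s : Int),
      ((PySem.List.enumerate xs s).filter (fun p => p.2)).map (fun p => p.1)
        = (pvIdx xs).map (fun j => j + s) := by
  induction xs with
  | nil => intro s; simp [pvIdx, PySem.List.enumerate_nil]
  | cons b t ih =>
      intro s
      cases b with
      | false =>
          simp only [pvIdx, PySem.List.enumerate_cons, List.filter_cons]
          simp only [if_false, Bool.false_eq_true]
          rw [ih (s + 1)]
          conv_rhs => rw [show (0:Int) + 1 = 1 by ring, ih 1]
          rw [List.map_map]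
          refine List.map_congr_left ?_
          intro j _
          simp only [Function.comp_apply]
          ring
      | true =>
          simp only [pvIdx, PySem.List.enumerate_cons, List.filter_cons]
          simp only [if_true, List.map_cons]
          rw [ih (s + 1)]
          conv_rhs => rw [show (0:Int) + 1 = 1 by ring, ih 1]
          rw [List.map_map]
          refine List.cons_eq_cons.mpr ⟨by ring, ?_⟩
          refine List.map_congr_left ?_
          intro j _
          simp only [Function.comp_apply]
          ring

lemma pvSel_map_add (l : List Int) (c d : Int) :
    pvSel (l.map (fun j => j + c)) d = (pvSel l d).map (fun j => j + c) := by
  unfold pvSel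
  by_cases h : 0 ≤ d ∧ d < (l.length : Int)
  · rw [if_pos (by simpa using h), if_pos h,
        PySem.List.pyGet?_of_nonneg _ h.1, PySem.List.pyGet?_of_nonneg _ h.1]
    simp
  · rw [if_neg (by simpa using h), if_neg h]
    rfl

lemma pvIdx_no_true (mask : List Bool) (h : true ∉ mask) : pvIdx mask = [] := by
  unfold pvIdx
  rw [List.filter_eq_nil_iff.mpr, List.map_nil]
  intro p hp
  rcases (PySem.List.mem_enumerate_iff _ _ _).mp hp with ⟨k, hk, rfl⟩
  intro hcon
  exact h (hcon ▸ List.getElem_mem hk)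

lemma pvIdx_split (pre suf : List Bool) (hpre : true ∉ pre) :
    pvIdx (pre ++ true :: suf) =
      ((pre.length : Int)) :: (pvIdx suf).map (fun j => j + ((pre.length : Int) + 1)) := by
  unfold pvIdx
  rw [PySem.List.enumerate_append, List.filter_append, List.map_append]
  have h1 : ((PySem.List.enumerate pre 0).filter (fun p => p.2)).map (fun p => p.1) = [] :=
    pvIdx_no_true pre hpre
  rw [h1, List.nil_append, PySem.List.enumerate_cons, List.filter_cons]
  simp only [if_true, List.map_cons]
  rw [pvIdxAux_shift suf ((0:Int) + pre.length + 1)]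
  refine List.cons_eq_cons.mpr ⟨by ring, ?_⟩
  refine List.map_congr_left ?_
  intro j _
  ring

lemma pvSel_cons_pos (x : Int) (l : List Int) (d : Int) (hd : 1 ≤ d) :
    pvSel (x :: l) d = pvSel l (d - 1) := by
  unfold pvSel
  by_cases h : 0 ≤ d - 1 ∧ d - 1 < (l.length : Int)
  · rw [if_pos h, if_pos (by simp only [List.length_cons]; push_cast; omega)]
    rw [PySem.List.pyGet?_of_nonneg _ (by omega : (0:Int) ≤ d),
        PySem.List.pyGet?_of_nonneg _ h.1,
        show d.toNat = (d - 1).toNat + 1 by omega, List.getElem?_cons_succ]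
  · rw [if_neg h, if_neg (by simp only [List.length_cons]; push_cast; omega)]

lemma pvIndexFrom_zero (mask : List Bool) :
    pvIndexFrom mask 0 = (PySem.List.index? mask true).map (fun q => (q : Int)) := by
  unfold pvIndexFrom
  simp only [Int.toNat_zero, List.drop_zero]
  cases PySem.List.index? mask true <;> simp

-- the rest of B's loop only ever looks past pos: it is the same loop on the dropped suffix, shifted
lemma pvGoB_shift (k : Nat) :
    ∀ (mask : List Bool) (pos : Int), -1 ≤ pos →
      pvGoB mask k pos
        = (pvGoB (mask.drop (pos + 1).toNat) k (-1)).map (fun r => r + (pos + 1)) := by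
  induction k with
  | zero =>
      intro mask pos _
      simp only [pvGoB, Option.map_some]
      congr 1
      ring
  | succ k ih =>
      intro mask pos hpos
      show (match pvIndexFrom mask (pos + 1) with
            | none => none
            | some p => pvGoB mask k p)
          = Option.map (fun r => r + (pos + 1))
              (match pvIndexFrom (mask.drop (pos + 1).toNat) (-1 + 1) with
               | none => none
               | some p => pvGoB (mask.drop (pos + 1).toNat) k p)
      rw [show (-1 + 1 : Int) = 0 by ring, pvIndexFrom_zero]
      unfold pvIndexFrom
      cases hq : PySem.List.index? (mask.drop (pos + 1).toNat) true with
      | none => rfl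
      | some q =>
          show pvGoB mask k (pos + 1 + (q : Int))
              = Option.map (fun r => r + (pos + 1)) (pvGoB (mask.drop (pos + 1).toNat) k ((q : Int)))
          rw [ih mask (pos + 1 + q) (by omega), ih (mask.drop (pos + 1).toNat) q (by omega)]
          have hdd : (mask.drop (pos + 1).toNat).drop ((q : Int) + 1).toNat
              = mask.drop ((pos + 1 + q) + 1).toNat := by
            rw [List.drop_drop]
            congr 1
            omega
          rw [hdd, Option.map_map]
          refine congrFun (congrArg Option.map ?_) _
          funext r
          simp only [Function.comp_apply]
          ring

-- B's loop computes selection from the index table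
lemma goB_eq_sel : ∀ (k : Nat) (mask : List Bool),
    pvGoB mask (k + 1) (-1) = pvSel (pvIdx mask) (k : Int) := by
  intro k
  induction k with
  | zero =>
      intro mask
      show (match pvIndexFrom mask (-1 + 1) with
            | none => none
            | some p => pvGoB mask 0 p)
          = pvSel (pvIdx mask) ((0 : Nat) : Int)
      rw [show (-1 + 1 : Int) = 0 by ring, pvIndexFrom_zero]
      cases hidx : PySem.List.index? mask true with
      | none =>
          have : true ∉ mask := (PySem.List.index?_eq_none_iff _ _).mp hidx
          rw [pvIdx_no_true mask this]
          unfold pvSel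
          rw [if_neg (by simp only [List.length_nil, Nat.cast_zero]; omega)]
          rfl
      | some pos =>
          rcases (PySem.List.index?_eq_some_iff _ _ _).mp hidx with ⟨pre, suf, rfl, hlen, hnp⟩
          subst hlen
          show some ((pre.length : Int)) = pvSel (pvIdx (pre ++ true :: suf)) ((0 : Nat) : Int)
          rw [pvIdx_split pre suf hnp]
          unfold pvSel
          rw [if_pos ⟨by simp, by exact_mod_cast Nat.succ_pos _⟩,
              show ((0 : Nat) : Int) = 0 by simp, PySem.List.pyGet?_zero_cons]
  | succ k ih =>
      intro mask
      show (match pvIndexFrom mask (-1 + 1) with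
            | none => none
            | some p => pvGoB mask (k + 1) p)
          = pvSel (pvIdx mask) ((k + 1 : Nat) : Int)
      rw [show (-1 + 1 : Int) = 0 by ring, pvIndexFrom_zero]
      cases hidx : PySem.List.index? mask true with
      | none =>
          have : true ∉ mask := (PySem.List.index?_eq_none_iff _ _).mp hidx
          rw [pvIdx_no_true mask this]
          unfold pvSel
          rw [if_neg (by simp only [List.length_nil, Nat.cast_zero]; omega)]
          rfl
      | some pos =>
          rcases (PySem.List.index?_eq_some_iff _ _ _).mp hidx with ⟨pre, suf, rfl, hlen, hnp⟩
          subst hlen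
          show pvGoB (pre ++ true :: suf) (k + 1) ((pre.length : Int))
              = pvSel (pvIdx (pre ++ true :: suf)) ((k + 1 : Nat) : Int)
          rw [pvIdx_split pre suf hnp,
              pvSel_cons_pos _ _ _ (by push_cast; omega), pvSel_map_add,
              pvGoB_shift (k + 1) (pre ++ true :: suf) ((pre.length : Int)) (by omega)]
          have hdrop : (pre ++ true :: suf).drop ((pre.length : Int) + 1).toNat = suf := by
            rw [show ((pre.length : Int) + 1).toNat = pre.length + 1 by omega,
                show pre ++ true :: suf = (pre ++ [true]) ++ suf by simp,
                show pre.length + 1 = (pre ++ [true]).length by simp, List.drop_left]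
          rw [hdrop, ih suf, show ((k + 1 : Nat) : Int) - 1 = (k : Int) by push_cast; ring]

-- B computes selection from the index table
lemma alt_eq_sel (mask : List Bool) (step : Int) :
    get_cam_id_from_mask_and_step_alt mask step = pvSel (pvIdx mask) step := by
  unfold get_cam_id_from_mask_and_step_alt
  by_cases hneg : step < 0
  · rw [if_pos hneg]
    unfold pvSel
    rw [if_neg (by intro h; omega)]
  · rw [if_neg hneg,
        show (step + 1).toNat = step.toNat + 1 by omega,
        goB_eq_sel step.toNat mask,
        show ((step.toNat : Int)) = step by omega]

-- ===== VERDICT (by name: the statement is the Claim_ definition above) =====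
theorem get_cam_id_from_mask_and_step_spec : Claim_equal_get_cam_id_from_mask_and_step := by
  intro mask step _
  unfold Spec_get_cam_id_from_mask_and_step
  rw [goA_eq_sel, alt_eq_sel]
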